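-- pv_equiv track=rewrite | github.com/jiiwang/DSA_coding_notes_Python | Python_code/combinations.py | combinations_with_sum_ge_k
-- ===== SOURCE A (Python) =====
-- def combinations_with_sum_ge_k(nums, k):
--     result = []
--     n = len(nums)
--
--     # Helper function to generate combinations
--     def generate_combinations(start, current_comb, sum):
--         if sum >= k:
--             result.append(current_comb[:])  # need to make a copy
--             if len(current_comb) == n:
--                 return
--
--         for i in range(start, n):
--             current_comb.append(i)
--             # sum += nums[i]
--             generate_combinations(i + 1, current_comb, sum+nums[i])
--             # sum -= nums[i]
--             current_comb.pop()
--
--     # Generate all combinations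
--     generate_combinations(0, [], 0)
--     return result
-- ===== SOURCE B (Python) =====
-- def combinations_with_sum_ge_k(nums, k):
--     n = len(nums)
--     result = []
--     stack = [(0, [], 0)]
--     while stack:
--         start, comb, s = stack.pop()
--         if s >= k:
--             result.append(comb)
--         for i in reversed(range(start, n)):
--             stack.append((i + 1, comb + [i], s + nums[i]))
--     return result
-- ===== Notes on version B (the rewrite author's own statement) =====
-- stated objective: alternative
-- what changed: Replaces the recursive backtracking helper (mutating a shared current_comb/result via closure) with an iterative DFS over an explicit stack of (start, combination, running_sum) frames, pushing children in reverse index order to preserve the exact preorder output.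
import Mathlib
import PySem

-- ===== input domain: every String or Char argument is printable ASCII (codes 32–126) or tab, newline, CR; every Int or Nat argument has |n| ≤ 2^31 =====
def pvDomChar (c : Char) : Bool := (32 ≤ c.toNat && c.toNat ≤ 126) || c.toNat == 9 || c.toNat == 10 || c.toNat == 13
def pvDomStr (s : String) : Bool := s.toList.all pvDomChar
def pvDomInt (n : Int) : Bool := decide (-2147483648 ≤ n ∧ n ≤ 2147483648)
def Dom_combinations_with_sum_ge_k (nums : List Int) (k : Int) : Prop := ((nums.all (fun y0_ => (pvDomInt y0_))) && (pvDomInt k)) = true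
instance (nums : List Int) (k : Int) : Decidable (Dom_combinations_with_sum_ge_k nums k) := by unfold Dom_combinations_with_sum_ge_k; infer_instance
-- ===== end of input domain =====

-- B replaces the recursive DFS helper by an iterative DFS over an explicit stack of
-- (start, combination, running-sum) frames; same output list and order (objective: alternative).


-- ===== PORT A =====
-- generate_combinations(start, current_comb, sum): genA, structurally recursive on a fuel
-- counter that only guards totality (fuel > n - start always holds on reachable calls, so the
-- fuel-exhausted branch is never taken); the for-loop over range(start, n) is loopA, a
-- structural recursion over that index list, its body calling genA on the rest of the fuel.
-- nums[i] is ported as pyGetD nums i 0: the loop ranges over i < n = len nums, so it is exact.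
def loopA (child : Nat → List Int → Int → List (List Int) → List (List Int))
    (nums : List Int) (cur : List Int) (s : Int) : List Nat → List (List Int) → List (List Int)
  | [], res => res
  | i :: is, res =>
      loopA child nums cur s is (child (i + 1) (cur ++ [(i : Int)]) (s + PySem.List.pyGetD nums (i : Int) 0) res)

def genA (nums : List Int) (k : Int) (n : Nat) : Nat → Nat → List Int → Int → List (List Int) → List (List Int)
  | 0, _, _, _, res => res
  | fuel + 1, start, cur, s, res =>
      let res1 := if k ≤ s then res ++ [cur] else res
      if k ≤ s ∧ cur.length = n then res1
      else loopA (genA nums k n fuel) nums cur s (List.range' start (n - start)) res1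

def combinations_with_sum_ge_k (nums : List Int) (k : Int) : List (List Int) :=
  genA nums k nums.length (nums.length + 1) 0 [] 0 []

-- ===== PORT B =====
-- pushRevB is B's 'for i in reversed(range(start, n)): stack.append((i+1, comb+[i], s+nums[i]))',
-- a structural recursion on the remaining count cnt (it pushes i = start+cnt-1 first, down to start).
def pushRevB (nums : List Int) (comb : List Int) (s : Int) (start : Nat) : Nat → List (Nat × List Int × Int) → List (Nat × List Int × Int)
  | 0, st => st
  | Nat.succ m, st =>
      pushRevB nums comb s start m
        ((start + m + 1, comb ++ [((start + m : Nat) : Int)], s + PySem.List.pyGetD nums ((start + m : Nat) : Int) 0) :: st)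

-- B's while-loop: pop a frame, record its combination if its sum reached k, push its children.
-- The fuel counter only guards totality: popping a frame (start, _, _) takes exactly 2^(n-start)
-- iterations for its whole subtree, so the initial fuel 2^(len nums) is never exhausted.
def runB (nums : List Int) (k : Int) (n : Nat) : Nat → List (Nat × List Int × Int) → List (List Int) → List (List Int)
  | 0, _, res => res
  | _ + 1, [], res => res
  | fuel + 1, (start, comb, s) :: rest, res =>
      runB nums k n fuel (pushRevB nums comb s start (n - start) rest)
        (if k ≤ s then res ++ [comb] else res)

def combinations_with_sum_ge_k_alt (nums : List Int) (k : Int) : List (List Int) :=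
  runB nums k nums.length (2 ^ nums.length) [(0, [], 0)] []

-- ===== PRECONDITION & SPEC =====
def Spec_combinations_with_sum_ge_k (nums : List Int) (k : Int) (out : List (List Int)) : Prop := out = combinations_with_sum_ge_k_alt nums k
instance (nums : List Int) (k : Int) (out : List (List Int)) : Decidable (Spec_combinations_with_sum_ge_k nums k out) := by unfold Spec_combinations_with_sum_ge_k; infer_instance

-- ===== CLAIM (what is proved, stated in full; the proofs are below) =====
def Claim_equal_combinations_with_sum_ge_k : Prop := ∀ (nums : List Int) (k : Int), Dom_combinations_with_sum_ge_k nums k → Spec_combinations_with_sum_ge_k nums k (combinations_with_sum_ge_k nums k)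

-- ===== LEMMAS AND PROOFS =====

theorem pushRevB_eq (nums comb : List Int) (s : Int) (start : Nat) :
    ∀ (cnt : Nat) (st : List (Nat × List Int × Int)),
      pushRevB nums comb s start cnt st =
        ((List.range' start cnt).map
          (fun i : Nat => (i + 1, comb ++ [(i : Int)], s + PySem.List.pyGetD nums (i : Int) 0))) ++ st := by
  intro cnt
  induction cnt with
  | zero => intro st; simp [pushRevB]
  | succ m ih =>
      intro st
      rw [pushRevB, ih, List.range'_concat]
      simp only [List.map_append, List.map_cons, List.map_nil, List.append_assoc, List.cons_append,
        List.nil_append, one_mul]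

-- The stack machine processes the top frame exactly as the recursion does: popping (start, cur, s)
-- and running on the pushed children takes exactly 2^(n-start) fuel and yields what genA appends.
theorem runB_genA (nums : List Int) (k : Int) (n : Nat) :
    ∀ (gfuel start : Nat) (cur : List Int) (s : Int) (bf : Nat) (rest : List (Nat × List Int × Int)) (res : List (List Int)),
      n - start < gfuel → cur.length ≤ start →
      runB nums k n (bf + 2 ^ (n - start)) ((start, cur, s) :: rest) res
        = runB nums k n bf rest (genA nums k n gfuel start cur s res) := by
  intro gfuel
  induction gfuel with
  | zero => intro start cur s bf rest res hc _; omega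
  | succ gfuel ih =>
      intro start cur s bf rest res hc hl
      rw [genA]
      by_cases hcond : k ≤ s ∧ cur.length = n
      · have h0 : n - start = 0 := by omega
        rw [h0]
        rw [show bf + 2 ^ 0 = bf + 1 from rfl, runB, h0, pushRevB]
        simp [hcond]
      · simp only [hcond, if_false]
        -- inner loop: processing the pushed frames for i ∈ [i0, n) takes 2^(n-i0) - 1 fuel and
        -- equals loopA on that index list
        have M : ∀ (d i0 : Nat) (r : List (List Int)) (bf' : Nat), n - i0 = d → start ≤ i0 →
            runB nums k n (bf' + (2 ^ (n - i0) - 1))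
              (((List.range' i0 (n - i0)).map
                 (fun i : Nat => (i + 1, cur ++ [(i : Int)], s + PySem.List.pyGetD nums (i : Int) 0))) ++ rest) r
            = runB nums k n bf' rest (loopA (genA nums k n gfuel) nums cur s (List.range' i0 (n - i0)) r) := by
          intro d
          induction d with
          | zero =>
              intro i0 r bf' hd _
              rw [hd]
              simp only [List.range'_zero, List.map_nil, List.nil_append, pow_zero,
                Nat.sub_self, Nat.add_zero]
              rw [loopA]
          | succ d ihd =>
              intro i0 r bf' hd hi
              have hin : i0 < n := by omega
              have hd' : n - (i0 + 1) = d := by omega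
              have hp2 : (2 : Nat) ^ (d + 1) = 2 ^ d * 2 := pow_succ 2 d
              have hposd : 0 < (2 : Nat) ^ d := Nat.two_pow_pos _
              have hfuel : bf' + (2 ^ (d + 1) - 1) = (bf' + (2 ^ d - 1)) + 2 ^ d := by omega
              rw [hd, List.range'_succ]
              simp only [List.map_cons, List.cons_append]
              rw [loopA, hfuel]
              have ihh := ih (i0 + 1) (cur ++ [(i0 : Int)]) (s + PySem.List.pyGetD nums (i0 : Int) 0)
                    (bf' + (2 ^ d - 1))
                    (((List.range' (i0 + 1) d).map
                      (fun i : Nat => (i + 1, cur ++ [(i : Int)], s + PySem.List.pyGetD nums (i : Int) 0))) ++ rest)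
                    r (by omega) (by simp; omega)
              rw [hd'] at ihh
              rw [ihh]
              have step := ihd (i0 + 1)
                  (genA nums k n gfuel (i0 + 1) (cur ++ [(i0 : Int)]) (s + PySem.List.pyGetD nums (i0 : Int) 0) r)
                  (bf') hd' (by omega)
              rw [hd'] at step
              exact step
        have hpos : 0 < (2 : Nat) ^ (n - start) := Nat.two_pow_pos _
        have hfuel : bf + 2 ^ (n - start) = (bf + (2 ^ (n - start) - 1)) + 1 := by omega
        rw [hfuel, runB, pushRevB_eq]
        exact M (n - start) start _ (bf) rfl (le_refl start)

-- ===== VERDICT (by name: the statement is the Claim_ definition above) =====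
theorem combinations_with_sum_ge_k_spec : Claim_equal_combinations_with_sum_ge_k := by
  intro nums k _
  unfold Spec_combinations_with_sum_ge_k combinations_with_sum_ge_k combinations_with_sum_ge_k_alt
  have h := runB_genA nums k nums.length (nums.length + 1) 0 [] 0 0 [] [] (by omega) (by simp)
  rw [Nat.zero_add, Nat.sub_zero] at h
  rw [h]
  rw [runB]
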